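-- pv_equiv track=rewrite | github.com/nrupala/sllm | core/phase2_system.py | _sentence_supported
-- ===== SOURCE A (Python) =====
-- def _sentence_supported(sentence: str, knowledge_content: str) -> bool:
--     """Check if a sentence is supported by knowledge content"""
--     sentence_words = set(sentence.lower().split())
--     knowledge_words = set(knowledge_content.lower().split())
--
--     overlap = len(sentence_words & knowledge_words)
--     if overlap >= 3:
--         return True
--
--     # Check for key term overlap
--     key_terms = [w for w in sentence_words if len(w) > 4]
--     if key_terms:
--         matching = sum(1 for t in key_terms if t in knowledge_words)
--         if matching >= 2:
--             return True
--
--     return False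
-- ===== SOURCE B (Python) =====
-- def _sentence_supported(sentence: str, knowledge_content: str) -> bool:
--     """Check support by merging the two sorted deduped word lists (two pointers)."""
--     sw = sorted(set(sentence.lower().split()))
--     kw = sorted(set(knowledge_content.lower().split()))
--     i = j = 0
--     overlap = matching = 0
--     while i < len(sw) and j < len(kw):
--         a, b = sw[i], kw[j]
--         if a < b:
--             i += 1
--         elif b < a:
--             j += 1
--         else:
--             overlap += 1
--             if len(a) > 4:
--                 matching += 1
--             i += 1
--             j += 1
--     return overlap >= 3 or matching >= 2
-- ===== Notes on version B (the rewrite author's own statement) =====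
-- stated objective: alternative
-- what changed: Replaces A's hash-set intersection plus key_terms comprehension plus sum with a different algorithm: sort both deduped word lists and count common words (and common words longer than 4) in a single two-pointer merge scan, returning overlap >= 3 or matching >= 2.
import Mathlib
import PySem

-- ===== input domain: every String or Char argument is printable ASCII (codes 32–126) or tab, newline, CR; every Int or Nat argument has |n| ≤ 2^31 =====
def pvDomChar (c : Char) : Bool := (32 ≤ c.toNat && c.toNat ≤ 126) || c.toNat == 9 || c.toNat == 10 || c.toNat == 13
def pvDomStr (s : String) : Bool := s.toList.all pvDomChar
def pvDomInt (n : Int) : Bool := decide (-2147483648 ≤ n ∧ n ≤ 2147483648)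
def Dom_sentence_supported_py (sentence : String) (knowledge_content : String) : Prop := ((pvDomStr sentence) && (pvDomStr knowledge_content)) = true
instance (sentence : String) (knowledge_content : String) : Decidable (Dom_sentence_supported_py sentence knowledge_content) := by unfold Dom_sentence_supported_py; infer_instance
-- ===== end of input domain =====

-- B replaces A's hash-set intersection + key_terms comprehension + sum with a sorted
-- two-pointer merge of the two deduped word lists; return value only, no side effects.

-- ===== PORT A =====
def sentence_supported_py (sentence : String) (knowledge_content : String) : Bool :=
  let sentence_words : PySem.Set String := PySem.Set.ofList (PySem.Str.split₀ (PySem.Str.lower sentence))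
  let knowledge_words : PySem.Set String := PySem.Set.ofList (PySem.Str.split₀ (PySem.Str.lower knowledge_content))
  let overlap : Int := PySem.Set.len (PySem.Set.inter sentence_words knowledge_words)
  if overlap ≥ 3 then true
  else
    let key_terms : List String := sentence_words.filter (fun w => PySem.Str.len w > 4)
    if key_terms ≠ [] then
      -- sum(1 for t in key_terms if t in knowledge_words), counting over the set's elements (order-independent)
      let matching : Int := (key_terms.countP (fun t => PySem.Set.contains knowledge_words t) : Int)
      if matching ≥ 2 then true else false
    else
      false

-- ===== PORT B =====
-- the while loop of Source B: two pointers over the sorted lists, advancing = taking tails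
def ssMerge : List String → List String → Int → Int → Bool
  | [], _, overlap, matching => overlap ≥ 3 || matching ≥ 2
  | _ :: _, [], overlap, matching => overlap ≥ 3 || matching ≥ 2
  | a :: xs, b :: ys, overlap, matching =>
    if a < b then ssMerge xs (b :: ys) overlap matching
    else if b < a then ssMerge (a :: xs) ys overlap matching
    else ssMerge xs ys (overlap + 1)
      (if PySem.Str.len a > 4 then matching + 1 else matching)
termination_by xs ys => xs.length + ys.length

def sentence_supported_py_alt (sentence : String) (knowledge_content : String) : Bool :=
  let sw : List String := PySem.List.sorted (PySem.Set.ofList (PySem.Str.split₀ (PySem.Str.lower sentence))) (fun x => x) false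
  let kw : List String := PySem.List.sorted (PySem.Set.ofList (PySem.Str.split₀ (PySem.Str.lower knowledge_content))) (fun x => x) false
  ssMerge sw kw 0 0

-- ===== PRECONDITION & SPEC =====
def Spec_sentence_supported_py (sentence : String) (knowledge_content : String) (out : Bool) : Prop := out = sentence_supported_py_alt sentence knowledge_content
instance (sentence : String) (knowledge_content : String) (out : Bool) : Decidable (Spec_sentence_supported_py sentence knowledge_content out) := by unfold Spec_sentence_supported_py; infer_instance

-- ===== CLAIM (what is proved, stated in full; the proofs are below) =====
def Claim_equal_sentence_supported_py : Prop := ∀ (sentence : String) (knowledge_content : String), Dom_sentence_supported_py sentence knowledge_content → Spec_sentence_supported_py sentence knowledge_content (sentence_supported_py sentence knowledge_content)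

-- ===== LEMMAS AND PROOFS =====

-- on strictly increasing lists the merge loop counts common words and common long words
theorem ssMerge_eq (xs : List String) : ∀ (ys : List String) (o m : Int),
    xs.Pairwise (· < ·) → ys.Pairwise (· < ·) →
    ssMerge xs ys o m =
      ((o + (xs.countP (fun w => w ∈ ys) : Int) ≥ 3) ||
       (m + (xs.countP (fun w => w ∈ ys && PySem.Str.len w > 4) : Int) ≥ 2)) := by
  induction xs with
  | nil => intro ys o m _ _; cases ys <;> simp [ssMerge]
  | cons a xs ih =>
    intro ys
    induction ys with
    | nil => intro o m _ _; simp [ssMerge]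
    | cons b ys ihy =>
      intro o m hx hy
      obtain ⟨hxa, hxs⟩ := List.pairwise_cons.1 hx
      obtain ⟨hyb, hys⟩ := List.pairwise_cons.1 hy
      by_cases hab : a < b
      · have h1 : ¬(a = b ∨ a ∈ ys) := by
          rintro (rfl | h)
          · exact lt_irrefl a hab
          · exact lt_asymm hab (hyb a h)
        have hstep : ssMerge (a :: xs) (b :: ys) o m = ssMerge xs (b :: ys) o m := by
          rw [ssMerge]; simp [hab]
        rw [hstep, ih (b :: ys) o m hxs hy]
        simp [List.mem_cons, h1]
      · by_cases hba : b < a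
        · have hne : ∀ w ∈ a :: xs, w ≠ b := by
            intro w hw
            rcases List.mem_cons.1 hw with rfl | hw
            · exact hba.ne'
            · exact (lt_trans hba (hxa w hw)).ne'
          have c1 : List.countP (fun w => decide (w ∈ b :: ys)) (a :: xs)
              = List.countP (fun w => decide (w ∈ ys)) (a :: xs) :=
            List.countP_congr (by intro w hw; simp [List.mem_cons, hne w hw])
          have c2 : List.countP (fun w => decide (w ∈ b :: ys) && decide (PySem.Str.len w > 4)) (a :: xs)
              = List.countP (fun w => decide (w ∈ ys) && decide (PySem.Str.len w > 4)) (a :: xs) :=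
            List.countP_congr (by intro w hw; simp [List.mem_cons, hne w hw])
          have hstep : ssMerge (a :: xs) (b :: ys) o m = ssMerge (a :: xs) ys o m := by
            rw [ssMerge]; simp [hab, hba]
          rw [hstep, ihy o m hx hys, c1, c2]
        · have heq : a = b := le_antisymm (not_lt.1 hba) (not_lt.1 hab)
          subst heq
          have c1 : List.countP (fun w => decide (w ∈ a :: ys)) xs
              = List.countP (fun w => decide (w ∈ ys)) xs :=
            List.countP_congr (by intro w hw; simp [List.mem_cons, (hxa w hw).ne'])
          have c2 : List.countP (fun w => decide (w ∈ a :: ys) && decide (PySem.Str.len w > 4)) xs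
              = List.countP (fun w => decide (w ∈ ys) && decide (PySem.Str.len w > 4)) xs :=
            List.countP_congr (by intro w hw; simp [List.mem_cons, (hxa w hw).ne'])
          have hstep : ssMerge (a :: xs) (a :: ys) o m
              = ssMerge xs ys (o + 1) (if PySem.Str.len a > 4 then m + 1 else m) := by
            rw [ssMerge]; simp
          rw [hstep, ih ys _ _ hxs hys, List.countP_cons, List.countP_cons, c1, c2]
          by_cases hl : PySem.Str.len a > 4 <;>
            simp only [hl, List.mem_cons, true_or, decide_true, ite_false,
              Bool.true_and, decide_eq_true_eq, if_pos] <;>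
            (congr 1 <;> rw [decide_eq_decide] <;> push_cast <;> omega)

theorem sentence_supported_py_spec : Claim_equal_sentence_supported_py := by
  intro sentence knowledge_content _
  unfold Spec_sentence_supported_py sentence_supported_py sentence_supported_py_alt
  rw [ssMerge_eq _ _ 0 0 (PySem.List.sorted_ofList_pairwise_lt _) (PySem.List.sorted_ofList_pairwise_lt _)]
  generalize PySem.Str.split₀ (PySem.Str.lower sentence) = S
  generalize PySem.Str.split₀ (PySem.Str.lower knowledge_content) = K
  -- name the two deduped word lists
  generalize hsw : PySem.Set.ofList S = sw at *
  generalize hkw : PySem.Set.ofList K = kw at *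
  -- B's counts over the sorted lists are A's counts over the set lists
  have e1 : List.countP (fun w => decide (w ∈ PySem.List.sorted kw (fun x => x) false))
        (PySem.List.sorted sw (fun x => x) false)
      = List.countP (fun t => PySem.Set.contains kw t) sw := by
    rw [List.Perm.countP_eq _ (PySem.List.sorted_perm sw (fun x => x) false)]
    exact List.countP_congr (by intro w _; simp [PySem.List.mem_sorted, PySem.Set.contains])
  have e2 : List.countP (fun w => decide (w ∈ PySem.List.sorted kw (fun x => x) false) && decide (PySem.Str.len w > 4))
        (PySem.List.sorted sw (fun x => x) false)
      = List.countP (fun w => PySem.Set.contains kw w && decide (PySem.Str.len w > 4)) sw := by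
    rw [List.Perm.countP_eq _ (PySem.List.sorted_perm sw (fun x => x) false)]
    exact List.countP_congr (by intro w _; simp [PySem.List.mem_sorted, PySem.Set.contains])
  rw [e1, e2]
  -- A's matching over key_terms is the fused count
  have hM : List.countP (fun w => PySem.Set.contains kw w && decide (PySem.Str.len w > 4)) sw
      = List.countP (fun t => PySem.Set.contains kw t) (sw.filter (fun w => decide (PySem.Str.len w > 4))) := by
    rw [List.countP_filter]
  simp only [PySem.Set.len, PySem.Set.inter, ← List.countP_eq_length_filter, hM, zero_add]
  by_cases hk : sw.filter (fun w => decide (PySem.Str.len w > 4)) = []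
  · rw [hk]
    simp only [List.countP_nil, ne_eq, not_true_eq_false, if_false]
    split_ifs <;> simp_all
  · simp only [ne_eq, hk, not_false_eq_true, if_true]
    split_ifs <;> simp_all
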